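-- pv_equiv track=rewrite | github.com/JenishPraveenKumarG/product-based-company-DSA | greedy-playlist/minimum_number_of_platform_required_for_a_railway_station.py | minimum_station
-- ===== SOURCE A (Python) =====
-- def minimum_station(arrival, depart):
--     n = len(arrival)
--     arrival.sort()
--     depart.sort()
--     cnt = 0
--     max_cnt = 0
--     i = 0
--     j = 0
--     while i<n:
--         if arrival[i] <= depart[j]:
--             i += 1
--             cnt+=1
--         else:
--             cnt-=1
--             j+=1
--         max_cnt = max(max_cnt, cnt)
--
--     return max_cnt
-- ===== SOURCE B (Python) =====
-- def minimum_station(arrival, depart):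
--     arrival.sort()
--     depart.sort()
--     best = 0
--     started = 0
--     for t in arrival:
--         # binary search: number of departures strictly before t
--         lo, hi = 0, len(depart)
--         while lo < hi:
--             mid = (lo + hi) // 2
--             if depart[mid] < t:
--                 lo = mid + 1
--             else:
--                 hi = mid
--         started += 1
--         overlap = started - lo
--         best = max(best, overlap)
--     return best
-- ===== Notes on version B (the rewrite author's own statement) =====
-- stated objective: alternative
-- what changed: Replaces the two-pointer merge with its running count by a direct per-train formula: platforms needed at train t = (trains started up to t) - (departures strictly before t, found by binary search), maximised over arrivals.
import Mathlib
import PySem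

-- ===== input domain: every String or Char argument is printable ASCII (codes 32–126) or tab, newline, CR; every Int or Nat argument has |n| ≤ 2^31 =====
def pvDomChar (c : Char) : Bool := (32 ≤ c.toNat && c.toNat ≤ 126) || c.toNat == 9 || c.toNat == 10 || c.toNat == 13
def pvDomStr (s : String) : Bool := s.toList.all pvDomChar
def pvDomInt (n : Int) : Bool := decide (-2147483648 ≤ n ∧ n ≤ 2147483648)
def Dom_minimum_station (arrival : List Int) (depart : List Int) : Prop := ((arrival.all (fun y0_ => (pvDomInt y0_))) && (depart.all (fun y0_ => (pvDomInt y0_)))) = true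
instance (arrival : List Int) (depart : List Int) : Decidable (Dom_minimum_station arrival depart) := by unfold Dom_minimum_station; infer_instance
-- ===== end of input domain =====

-- B replaces A's two-pointer merge by a per-arrival overlap formula; both Pythons sort both
-- argument lists in place (same side effect); the equivalence proved is about the return value.

-- ===== PORT A =====
-- the while loop; fuel bounds the number of iterations (each step increments i or j);
-- the `| _, _ => maxc` arm is where Python raises IndexError (excluded by Pre_)
def pvLoopA (a d : List Int) (n : Int) : Nat → Int → Int → Int → Int → Int
  | 0, _, _, _, maxc => maxc
  | fuel+1, i, j, cnt, maxc =>
    if i < n then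
      match PySem.List.pyGet? a i, PySem.List.pyGet? d j with
      | some ai, some dj =>
        if ai ≤ dj then pvLoopA a d n fuel (i+1) j (cnt+1) (max maxc (cnt+1))
        else pvLoopA a d n fuel i (j+1) (cnt-1) (max maxc (cnt-1))
      | _, _ => maxc
    else maxc

def minimum_station (arrival : List Int) (depart : List Int) : Int :=
  let n : Int := arrival.length
  let a := PySem.List.sorted arrival (fun x => x) false
  let d := PySem.List.sorted depart (fun x => x) false
  pvLoopA a d n (arrival.length + depart.length + 1) 0 0 0 0

-- ===== PORT B =====
-- B's inner while loop: binary search for the number of departures strictly before t;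
-- fuel bounds the iterations (hi - lo strictly decreases); the `none` arm is unreachable
-- for 0 ≤ lo < hi ≤ len d
def pvBis (d : List Int) (t : Int) : Nat → Int → Int → Int
  | 0, lo, _ => lo
  | fuel+1, lo, hi =>
    if lo < hi then
      let mid := PySem.Int.floordiv (lo + hi) 2
      match PySem.List.pyGet? d mid with
      | some v =>
        if v < t then pvBis d t fuel (mid + 1) hi
        else pvBis d t fuel lo mid
      | none => lo
    else lo

-- one iteration of B's for-loop: state = (started, best)
def pvStep (d : List Int) (st : Int × Int) (t : Int) : Int × Int :=
  let lo := pvBis d t (d.length + 1) 0 (d.length : Int)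
  let started := st.1 + 1
  let overlap := started - lo
  (started, max st.2 overlap)

def minimum_station_alt (arrival : List Int) (depart : List Int) : Int :=
  let a := PySem.List.sorted arrival (fun x => x) false
  let d := PySem.List.sorted depart (fun x => x) false
  (a.foldl (pvStep d) (0, 0)).2

-- ===== PRECONDITION & SPEC =====
-- Pre_ excludes exactly the inputs on which A raises IndexError (some arrival exceeds
-- every departure, walking j past the end of depart); A returns on everything else.
def Pre_minimum_station (arrival : List Int) (depart : List Int) : Prop :=
  arrival = [] ∨ ∃ y ∈ depart, ∀ x ∈ arrival, x ≤ y
instance (arrival : List Int) (depart : List Int) : Decidable (Pre_minimum_station arrival depart) := by unfold Pre_minimum_station; infer_instance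

def pvWitness_minimum_station : List Int × List Int := ([1, 3, 2], [2, 4, 5])

def Spec_minimum_station (arrival : List Int) (depart : List Int) (out : Int) : Prop := out = minimum_station_alt arrival depart
instance (arrival : List Int) (depart : List Int) (out : Int) : Decidable (Spec_minimum_station arrival depart out) := by unfold Spec_minimum_station; infer_instance

-- ===== CLAIM (what is proved, stated in full; the proofs are below) =====
def Claim_equal_minimum_station : Prop := ∀ (arrival : List Int) (depart : List Int), Dom_minimum_station arrival depart → Pre_minimum_station arrival depart → Spec_minimum_station arrival depart (minimum_station arrival depart)


-- ===== LEMMAS AND PROOFS =====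

-- common reference: the running-count max, recursing on the arrival list, consuming from the
-- departure list exactly the elements strictly below the current arrival
def pvBMax : List Int → List Int → Int → Int → Int
  | [], _, _, best => best
  | t :: a', d', cnt, best =>
      let c := d'.countP (fun y => decide (y < t))
      let cnt' := cnt + 1 - (c : Int)
      pvBMax a' (d'.drop c) cnt' (max best cnt')

-- in a sorted list, the first countP (· < t) elements are exactly those < t
theorem pv_take_countP_lt (t : Int) : ∀ (l : List Int), l.Pairwise (· ≤ ·) →
    ∀ y ∈ l.take (l.countP (fun y => decide (y < t))), y < t := by
  intro l
  induction l with
  | nil => intro _ y hy; simp at hy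
  | cons u l' ih =>
    intro hp y hy
    rcases List.pairwise_cons.mp hp with ⟨hu, hp'⟩
    by_cases hut : u < t
    · simp only [List.countP_cons, hut, decide_true, if_true] at hy
      rw [List.take_succ_cons] at hy
      rcases List.mem_cons.mp hy with rfl | hy
      · exact hut
      · exact ih hp' y hy
    · have hz : l'.countP (fun y => decide (y < t)) = 0 := by
        rw [List.countP_eq_zero]
        intro z hz
        simp only [decide_eq_true_eq]
        exact fun h => hut (lt_of_le_of_lt (hu z hz) h)
      simp only [List.countP_cons, hut, decide_false, hz] at hy
      simp at hy

theorem pv_countP_zero_of_sorted_head (t u : Int) (l : List Int)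
    (hp : (u :: l).Pairwise (· ≤ ·)) (htu : t ≤ u) :
    (u :: l).countP (fun y => decide (y < t)) = 0 := by
  rw [List.countP_eq_zero]
  intro z hz
  simp only [decide_eq_true_eq]
  rcases List.pairwise_cons.mp hp with ⟨hu, _⟩
  rcases hz with _ | hz
  · omega
  · have := hu z (by assumption)
    omega

-- A's loop equals pvBMax on the suffixes
theorem pvLoopA_eq (a d : List Int) (ha : a.Pairwise (· ≤ ·)) (hd : d.Pairwise (· ≤ ·)) :
    ∀ (fuel : Nat) (i j : Nat) (cnt maxc : Int),
    (a.length - i) + (d.length - j) < fuel →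
    i ≤ a.length → j ≤ d.length →
    (∀ x ∈ a.drop i, ∃ y ∈ d.drop j, x ≤ y) →
    cnt ≤ maxc →
    pvLoopA a d (a.length : Int) fuel (i : Int) (j : Int) cnt maxc
      = pvBMax (a.drop i) (d.drop j) cnt maxc := by
  intro fuel
  induction fuel with
  | zero => intro i j cnt maxc hf; omega
  | succ fuel ih =>
    intro i j cnt maxc hf hi hj hpre hcm
    by_cases hin : i < a.length
    · -- a.drop i = a[i] :: rest
      have hai : PySem.List.pyGet? a (i : Int) = some a[i] := by
        rw [PySem.List.pyGet?_natCast]; exact List.getElem?_eq_getElem hin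
      have hdropa : a.drop i = a[i] :: a.drop (i+1) := List.drop_eq_getElem_cons hin
      -- j < d.length from hpre
      have hjlt : j < d.length := by
        have : a[i] ∈ a.drop i := by rw [hdropa]; exact List.mem_cons_self
        rcases hpre _ this with ⟨y, hy, _⟩
        by_contra h
        have : d.drop j = [] := List.drop_eq_nil_of_le (by omega)
        rw [this] at hy; simp at hy
      have hdj : PySem.List.pyGet? d (j : Int) = some d[j] := by
        rw [PySem.List.pyGet?_natCast]; exact List.getElem?_eq_getElem hjlt
      have hdropd : d.drop j = d[j] :: d.drop (j+1) := List.drop_eq_getElem_cons hjlt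
      have hstep : pvLoopA a d (a.length : Int) (fuel+1) (i : Int) (j : Int) cnt maxc
          = if a[i] ≤ d[j] then pvLoopA a d (a.length : Int) fuel ((i:Int)+1) (j:Int) (cnt+1) (max maxc (cnt+1))
            else pvLoopA a d (a.length : Int) fuel (i:Int) ((j:Int)+1) (cnt-1) (max maxc (cnt-1)) := by
        rw [pvLoopA, if_pos (show (i:Int) < (a.length:Int) by exact_mod_cast hin), hai, hdj]
      rw [hstep]
      by_cases hcmp : a[i] ≤ d[j]
      · rw [if_pos hcmp]
        have hc0 : (d.drop j).countP (fun y => decide (y < a[i])) = 0 := by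
          rw [hdropd]
          exact pv_countP_zero_of_sorted_head _ _ _ (by rw [← hdropd]; exact hd.drop) hcmp
        have step : pvBMax (a.drop i) (d.drop j) cnt maxc
            = pvBMax (a.drop (i+1)) (d.drop j) (cnt+1) (max maxc (cnt+1)) := by
          rw [hdropa, pvBMax, hc0]
          norm_num
        rw [step]
        have hcast : ((i : Int) + 1) = ((i + 1 : Nat) : Int) := by push_cast; ring
        rw [hcast]
        exact ih (i+1) j (cnt+1) (max maxc (cnt+1)) (by omega) (by omega) hj
          (fun x hx => hpre x (by rw [hdropa]; exact List.mem_cons_of_mem _ hx))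
          (le_max_right _ _)
      · rw [if_neg hcmp]
        rw [not_le] at hcmp
        -- departure step: pvBMax absorbs it
        have hmax : max maxc (cnt - 1) = maxc := max_eq_left (by omega)
        have hsplit : (d.drop j).countP (fun y => decide (y < a[i]))
            = 1 + (d.drop (j+1)).countP (fun y => decide (y < a[i])) := by
          rw [hdropd, List.countP_cons, if_pos (by simpa using hcmp)]
          omega
        have step : pvBMax (a.drop i) (d.drop j) cnt maxc
            = pvBMax (a.drop i) (d.drop (j+1)) (cnt - 1) maxc := by
          conv_lhs => rw [hdropa]
          conv_rhs => rw [hdropa]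
          simp only [pvBMax, hsplit]
          have hdd : (d.drop j).drop (1 + (d.drop (j+1)).countP (fun y => decide (y < a[i])))
              = (d.drop (j+1)).drop ((d.drop (j+1)).countP (fun y => decide (y < a[i]))) := by
            rw [List.drop_drop, List.drop_drop]
            congr 1
            omega
          rw [hdd]
          congr 1
          · push_cast; ring
          · congr 1; push_cast; ring
        rw [step, hmax]
        have hcast : ((j : Int) + 1) = ((j + 1 : Nat) : Int) := by push_cast; ring
        rw [hcast]
        refine ih i (j+1) (cnt-1) maxc (by omega) hi (by omega) ?_ (by omega)
        -- Pre is preserved: the witness departure cannot be d[j]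
        intro x hx
        rcases hpre x hx with ⟨y, hy, hxy⟩
        rw [hdropd] at hy
        rcases List.mem_cons.mp hy with rfl | hy
        · -- x ≤ d[j] < a[i] ≤ x: contradiction since a sorted and x ∈ a.drop i
          exfalso
          have hax : a[i] ≤ x := by
            rw [hdropa] at hx
            rcases List.mem_cons.mp hx with rfl | hx
            · exact le_rfl
            · have hpd : (a.drop i).Pairwise (· ≤ ·) := ha.drop
              rw [hdropa] at hpd
              exact (List.pairwise_cons.mp hpd).1 x hx
          omega
        · exact ⟨y, hy, hxy⟩
    · -- loop exit
      rw [pvLoopA, if_neg (by exact_mod_cast hin)]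
      have : a.drop i = [] := List.drop_eq_nil_of_le (by omega)
      rw [this, pvBMax]

-- a cut point (everything before it < t, everything from it on ≥ t) is the countP
theorem pv_countP_eq_of_cut (d : List Int) (t : Int) (lo : Nat) (hlo : lo ≤ d.length)
    (h1 : ∀ (k : Nat) (hk : k < d.length), k < lo → d[k] < t)
    (h2 : ∀ (k : Nat) (hk : k < d.length), lo ≤ k → ¬ d[k] < t) :
    d.countP (fun y => decide (y < t)) = lo := by
  conv_lhs => rw [← List.take_append_drop lo d]
  rw [List.countP_append]
  have ht : (d.take lo).countP (fun y => decide (y < t)) = lo := by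
    have hall : ∀ y ∈ d.take lo, (fun y => decide (y < t)) y = true := by
      intro y hy
      rcases List.mem_iff_getElem.mp hy with ⟨k, hk, rfl⟩
      have hk' : k < lo := by
        have := hk
        simp only [List.length_take] at this
        omega
      rw [List.getElem_take]
      simp only [decide_eq_true_eq]
      exact h1 k (by omega) hk'
    rw [List.countP_eq_length.mpr hall, List.length_take]
    omega
  have hdp : (d.drop lo).countP (fun y => decide (y < t)) = 0 := by
    rw [List.countP_eq_zero]
    intro y hy
    rcases List.mem_iff_getElem.mp hy with ⟨k, hk, rfl⟩
    have hk' : lo + k < d.length := by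
      have := hk
      simp only [List.length_drop] at this
      omega
    rw [List.getElem_drop]
    simp only [decide_eq_true_eq]
    exact h2 (lo + k) hk' (by omega)
  omega

-- the binary search computes countP (· < t) on a sorted list
theorem pvBis_eq (d : List Int) (t : Int) (hd : d.Pairwise (· ≤ ·)) :
    ∀ (fuel : Nat) (lo hi : Nat), hi - lo < fuel → lo ≤ hi → hi ≤ d.length →
    (∀ (k : Nat) (hk : k < d.length), k < lo → d[k] < t) →
    (∀ (k : Nat) (hk : k < d.length), hi ≤ k → ¬ d[k] < t) →
    pvBis d t fuel (lo : Int) (hi : Int)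
      = ((d.countP (fun y => decide (y < t)) : Nat) : Int) := by
  intro fuel
  induction fuel with
  | zero => intro lo hi hf; omega
  | succ fuel ih =>
    intro lo hi hf hlh hhi h1 h2
    by_cases hlt : lo < hi
    · set midn := (lo + hi) / 2 with hmidn
      have hmb : lo ≤ midn ∧ midn < hi := by omega
      have hcast : PySem.Int.floordiv ((lo : Int) + (hi : Int)) 2 = ((midn : Nat) : Int) := by
        rw [show ((lo : Int) + (hi : Int)) = ((lo + hi : Nat) : Int) by push_cast; ring]
        exact_mod_cast PySem.Int.floordiv_natCast (lo + hi) 2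
      have hget : PySem.List.pyGet? d ((midn : Nat) : Int) = some d[midn] := by
        rw [PySem.List.pyGet?_natCast]
        exact List.getElem?_eq_getElem (by omega)
      have hstep : pvBis d t (fuel+1) (lo : Int) (hi : Int)
          = if d[midn] < t then pvBis d t fuel ((midn : Int) + 1) (hi : Int)
            else pvBis d t fuel (lo : Int) (midn : Int) := by
        rw [pvBis, if_pos (show (lo : Int) < (hi : Int) by exact_mod_cast hlt), hcast]
        simp only [hget]
      rw [hstep]
      have hmono := List.pairwise_iff_getElem.mp hd
      by_cases hm : d[midn] < t
      · rw [if_pos hm, show ((midn : Int) + 1) = ((midn + 1 : Nat) : Int) by push_cast; ring]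
        refine ih (midn + 1) hi (by omega) (by omega) hhi ?_ h2
        intro k hk hkm
        rcases Nat.lt_or_ge k midn with hkl | hke
        · exact lt_of_le_of_lt (hmono k midn hk (by omega) hkl) hm
        · have : k = midn := by omega
          subst this
          exact hm
      · rw [if_neg hm]
        refine ih lo midn (by omega) (by omega) (by omega) h1 ?_
        intro k hk hkm
        rcases Nat.lt_or_ge midn k with hkl | hke
        · have := hmono midn k (by omega) hk hkl
          omega
        · have : k = midn := by omega
          subst this
          exact hm
    · have hstep : pvBis d t (fuel+1) (lo : Int) (hi : Int) = (lo : Int) := by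
        rw [pvBis, if_neg (show ¬ (lo : Int) < (hi : Int) by exact_mod_cast hlt)]
      have hcut : d.countP (fun y => decide (y < t)) = lo :=
        pv_countP_eq_of_cut d t lo (by omega) h1
          (fun k hk hky => h2 k hk (by omega))
      rw [hstep, hcut]

-- B's fold equals pvBMax (j departures already consumed, all below every remaining arrival)
theorem pvFold_eq (d : List Int) (hd : d.Pairwise (· ≤ ·)) :
    ∀ (a : List Int) (j : Nat) (s best : Int),
    a.Pairwise (· ≤ ·) → j ≤ d.length →
    (∀ y ∈ d.take j, ∀ x ∈ a, y < x) →
    (a.foldl (pvStep d) (s, best)).2 = pvBMax a (d.drop j) (s - j) best := by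
  intro a
  induction a with
  | nil => intro j s best _ _ _; rw [List.foldl_nil, pvBMax]
  | cons t a' ih =>
    intro j s best ha hj hpre
    rcases List.pairwise_cons.mp ha with ⟨hta, ha'⟩
    rw [List.foldl_cons]
    set c := (d.drop j).countP (fun y => decide (y < t)) with hc
    have hcle : c ≤ d.length - j := by
      have h1 := List.countP_le_length (l := d.drop j) (p := fun y => decide (y < t))
      rw [List.length_drop] at h1
      omega
    have hsplitd : d.countP (fun y => decide (y < t)) = j + c := by
      conv_lhs => rw [← List.take_append_drop j d]
      rw [List.countP_append]
      have htk : (d.take j).countP (fun y => decide (y < t)) = j := by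
        have hall : ∀ y ∈ d.take j, (fun y => decide (y < t)) y = true := by
          intro y hy
          simp only [decide_eq_true_eq]
          exact hpre y hy t List.mem_cons_self
        rw [List.countP_eq_length.mpr hall, List.length_take]
        omega
      rw [htk, hc]
    have hX : s + 1 - ((d.countP (fun y => decide (y < t)) : Nat) : Int)
        = (s - j) + 1 - (c : Int) := by rw [hsplitd]; push_cast; ring
    have hbis : pvBis d t (d.length + 1) 0 (d.length : Int)
        = ((d.countP (fun y => decide (y < t)) : Nat) : Int) := by
      have h0 := pvBis_eq d t hd (d.length + 1) 0 d.length (by omega) (by omega) le_rfl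
        (by intro k hk h; omega) (by intro k hk h; omega)
      simpa using h0
    have hstep : pvStep d (s, best) t = (s + 1, max best ((s - j) + 1 - (c : Int))) := by
      simp only [pvStep, hbis, hX]
    rw [hstep]
    have hpre' : ∀ y ∈ d.take (j + c), ∀ x ∈ a', y < x := by
      intro y hy x hx
      rw [← List.take_append_drop j (d.take (j+c))] at hy
      rcases List.mem_append.mp hy with hy1 | hy1
      · rw [List.take_take, min_eq_left (by omega)] at hy1
        exact hpre y hy1 x (List.mem_cons_of_mem _ hx)
      · have hy2 : y ∈ (d.drop j).take c := by
          rw [List.drop_take] at hy1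
          have hjc : j + c - j = c := by omega
          rwa [hjc] at hy1
        have hyt : y < t := pv_take_countP_lt t (d.drop j) hd.drop y hy2
        exact lt_of_lt_of_le hyt (hta x hx)
    rw [ih (j + c) (s + 1) (max best ((s - j) + 1 - (c : Int))) ha' (by omega) hpre']
    conv_rhs => rw [pvBMax]
    simp only [← hc]
    rw [List.drop_drop]
    have h1 : (s + 1) - ((j + c : Nat) : Int) = (s - j) + 1 - (c : Int) := by push_cast; ring
    have h2 : c + j = j + c := by omega
    rw [h1]

-- ===== VERDICT (by name: the statement is the Claim_ definition above) =====
theorem minimum_station_spec : Claim_equal_minimum_station := by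
  intro arrival depart _ hpre
  unfold Spec_minimum_station minimum_station minimum_station_alt
  dsimp only
  set a := PySem.List.sorted arrival (fun x => x) false with hA
  set d := PySem.List.sorted depart (fun x => x) false with hD
  have ha : a.Pairwise (· ≤ ·) := PySem.List.sorted_pairwise arrival (fun x => x)
  have hd : d.Pairwise (· ≤ ·) := PySem.List.sorted_pairwise depart (fun x => x)
  have hla : a.length = arrival.length := PySem.List.length_sorted _ _ _
  have hld : d.length = depart.length := PySem.List.length_sorted _ _ _
  have hpre0 : ∀ x ∈ a.drop 0, ∃ y ∈ d.drop 0, x ≤ y := by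
    simp only [List.drop_zero]
    intro x hx
    have hx' : x ∈ arrival := (PySem.List.mem_sorted _ _ _ _).mp hx
    rcases hpre with rfl | ⟨y, hy, hall⟩
    · simp at hx'
    · exact ⟨y, (PySem.List.mem_sorted _ _ _ _).mpr hy, hall x hx'⟩
  have hL := pvLoopA_eq a d ha hd (a.length + depart.length + 1) 0 0 0 0
    (by omega) (by omega) (by omega) hpre0 le_rfl
  have hR := pvFold_eq d hd a 0 0 0 ha (by omega) (by intro y hy; simp at hy)
  simp only [Nat.cast_zero] at hL
  simp only [List.drop_zero] at hL hR
  norm_num at hR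
  rw [← hla, hL, hR]
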